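-- pv_equiv track=rewrite | github.com/teglin333/py-workbook | admission-price.py | calculateTotalAdmission
-- ===== SOURCE A (Python) =====
-- admission_toddler = 0
--
-- admission_kids = 14
--
-- admission_adult = 23
--
-- admission_senior = 18
--
-- def calculateTotalAdmission(L):
--     total = 0
--     for x in L:
--         if 0 <= x < 3:
--             total += admission_toddler
--         elif 3 <= x < 13:
--             total += admission_kids
--         elif 13 <= x < 65:
--             total += admission_adult
--         else:
--             total += admission_senior
--     return total
-- ===== SOURCE B (Python) =====
-- PRICES = [18, 0, 14, 23, 18]  # index 0: x<0 (senior catch-all), 1: toddler, 2: kids, 3: adult, 4: senior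
-- THRESHOLDS = (0, 3, 13, 65)
--
-- def calculateTotalAdmission(L):
--     total = 0
--     for x in L:
--         idx = sum(1 for t in THRESHOLDS if t <= x)  # rank of x among bracket boundaries
--         total += PRICES[idx]
--     return total
-- ===== Notes on version B (the rewrite author's own statement) =====
-- stated objective: alternative
-- what changed: Replaces the if/elif price cascade with a price table indexed by the rank of the age among the bracket boundaries (0,3,13,65), with the senior catch-all price at both ends of the table.
import Mathlib
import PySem

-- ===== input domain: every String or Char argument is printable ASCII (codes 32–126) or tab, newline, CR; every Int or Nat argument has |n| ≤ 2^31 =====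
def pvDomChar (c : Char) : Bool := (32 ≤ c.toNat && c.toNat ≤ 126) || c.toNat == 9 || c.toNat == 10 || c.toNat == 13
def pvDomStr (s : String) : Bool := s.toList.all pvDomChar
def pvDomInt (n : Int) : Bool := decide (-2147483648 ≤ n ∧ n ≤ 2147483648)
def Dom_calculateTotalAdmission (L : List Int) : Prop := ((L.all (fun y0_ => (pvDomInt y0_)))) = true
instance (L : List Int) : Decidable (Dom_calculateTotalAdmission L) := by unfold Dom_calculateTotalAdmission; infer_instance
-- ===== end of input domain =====

-- B replaces A's if/elif price cascade with a table lookup indexed by the age's rank among the bracket boundaries (alternative structure, same cost).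


-- ===== PORT A =====
def admission_toddler : Int := 0
def admission_kids : Int := 14
def admission_adult : Int := 23
def admission_senior : Int := 18

def calculateTotalAdmission (L : List Int) : Int :=
  L.foldl (fun total x =>
    if 0 ≤ x ∧ x < 3 then total + admission_toddler
    else if 3 ≤ x ∧ x < 13 then total + admission_kids
    else if 13 ≤ x ∧ x < 65 then total + admission_adult
    else total + admission_senior) 0

-- ===== PORT B =====
def pvPrices : List Int := [18, 0, 14, 23, 18]
def pvThresholds : List Int := [0, 3, 13, 65]
-- idx = sum(1 for t in THRESHOLDS if t <= x)
def pvIdx (x : Int) : Int :=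
  (pvThresholds.map (fun t => if t ≤ x then (1 : Int) else 0)).sum
-- PRICES[idx]: always in range; pyGet? returns some here, getD 0 only makes it total
def calculateTotalAdmission_alt (L : List Int) : Int :=
  L.foldl (fun total x => total + (PySem.List.pyGet? pvPrices (pvIdx x)).getD 0) 0

-- ===== PRECONDITION & SPEC =====
def Spec_calculateTotalAdmission (L : List Int) (out : Int) : Prop := out = calculateTotalAdmission_alt L
instance (L : List Int) (out : Int) : Decidable (Spec_calculateTotalAdmission L out) := by unfold Spec_calculateTotalAdmission; infer_instance

-- ===== CLAIM (what is proved, stated in full; the proofs are below) =====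
def Claim_equal_calculateTotalAdmission : Prop := ∀ (L : List Int), Dom_calculateTotalAdmission L → Spec_calculateTotalAdmission L (calculateTotalAdmission L)

-- ===== LEMMAS AND PROOFS =====

-- per-element agreement of the two loop bodies
lemma pv_step (x : Int) :
    (if 0 ≤ x ∧ x < 3 then admission_toddler
     else if 3 ≤ x ∧ x < 13 then admission_kids
     else if 13 ≤ x ∧ x < 65 then admission_adult
     else admission_senior)
    = (PySem.List.pyGet? pvPrices (pvIdx x)).getD 0 := by
  unfold pvIdx pvThresholds pvPrices admission_toddler admission_kids admission_adult admission_senior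
  simp only [List.map, List.sum_cons, List.sum_nil]
  by_cases h0 : 0 ≤ x <;> by_cases h3 : 3 ≤ x <;> by_cases h13 : 13 ≤ x <;> by_cases h65 : 65 ≤ x <;>
    simp [h0, h3, h13, h65, PySem.List.pyGet?, PySem.List.pyIdx?] <;> omega

lemma pv_fold (L : List Int) (t : Int) :
    L.foldl (fun total x =>
      if 0 ≤ x ∧ x < 3 then total + admission_toddler
      else if 3 ≤ x ∧ x < 13 then total + admission_kids
      else if 13 ≤ x ∧ x < 65 then total + admission_adult
      else total + admission_senior) t
    = L.foldl (fun total x => total + (PySem.List.pyGet? pvPrices (pvIdx x)).getD 0) t := by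
  induction L generalizing t with
  | nil => rfl
  | cons x xs ih =>
    simp only [List.foldl]
    rw [← pv_step x]
    split_ifs <;> exact ih _

-- ===== VERDICT (by name: the statement is the Claim_ definition above) =====
theorem calculateTotalAdmission_spec : Claim_equal_calculateTotalAdmission := by
  intro L _
  unfold Spec_calculateTotalAdmission calculateTotalAdmission calculateTotalAdmission_alt
  exact pv_fold L 0
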